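-- pv_equiv track=rewrite | github.com/pypi-data/pypi-mirror-350 | packages/texmark/texmark-0.5.5-py3-none-any.whl/texmark/filters/__main__.py | parse_attr_string
-- ===== SOURCE A (Python) =====
-- def parse_attr_string(attr_string):
--     identifier = ''
--     classes = []
--     attributes = {}
--     for token in attr_string.split():
--         if token.startswith('#'):
--             identifier = token[1:]
--         elif token.startswith('.'):
--             classes.append(token[1:])
--         elif '=' in token:
--             key, val = token.split('=', 1)
--             attributes[key] = val
--     return identifier, classes, attributes
-- ===== SOURCE B (Python) =====
-- def _scan(tokens):
--     # right-to-left structural recursion: combine the head token with the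
--     # already-scanned suffix result
--     if not tokens:
--         return None, [], []
--     ident, classes, pairs = _scan(tokens[1:])
--     t = tokens[0]
--     if t.startswith('#'):
--         return (ident if ident is not None else t[1:]), classes, pairs
--     if t.startswith('.'):
--         return ident, [t[1:]] + classes, pairs
--     if '=' in t:
--         k, v = t.split('=', 1)
--         return ident, classes, [(k, v)] + pairs
--     return ident, classes, pairs
--
--
-- def parse_attr_string(attr_string):
--     ident, classes, pairs = _scan(attr_string.split())
--     return ('' if ident is None else ident), classes, dict(pairs)
-- ===== Notes on version B (the rewrite author's own statement) =====
-- stated objective: alternative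
-- what changed: Replaces A's iterative left-to-right loop that mutates a dict in place by a right-to-left structural recursion that scans the suffix first and combines it with the head token (Option sentinel for the identifier, prepended classes and key/value pairs), building the dict once from the collected pairs at the end.
import Mathlib
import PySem

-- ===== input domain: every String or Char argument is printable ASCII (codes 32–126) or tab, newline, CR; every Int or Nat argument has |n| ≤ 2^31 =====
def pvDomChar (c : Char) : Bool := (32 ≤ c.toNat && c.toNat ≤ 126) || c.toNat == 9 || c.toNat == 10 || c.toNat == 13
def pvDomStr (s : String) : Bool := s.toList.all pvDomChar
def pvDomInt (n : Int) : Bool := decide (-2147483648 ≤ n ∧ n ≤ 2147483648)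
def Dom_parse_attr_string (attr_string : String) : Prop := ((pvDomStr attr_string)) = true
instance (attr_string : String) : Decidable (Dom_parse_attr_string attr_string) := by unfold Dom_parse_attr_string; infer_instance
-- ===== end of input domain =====

-- B replaces A's iterative loop (mutating a dict in place) by a right-to-left structural
-- recursion that scans the suffix first and combines it with the head token, building the
-- dict once from the collected pairs at the end; same cost, a different decomposition.


-- ===== PORT A =====
-- loop body of A's single for-loop (branches in A's elif order)
def pvStepA (acc : String × List String × PySem.Dict String String) (token : String) :
    String × List String × PySem.Dict String String :=
  if PySem.Str.startswith token "#" then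
    (PySem.Str.slice token (some 1) none, acc.2.1, acc.2.2)
  else if PySem.Str.startswith token "." then
    (acc.1, acc.2.1 ++ [PySem.Str.slice token (some 1) none], acc.2.2)
  else if PySem.Str.isIn "=" token then
    -- key, val = token.split('=', 1): '=' in token guarantees exactly two parts
    match PySem.Str.splitMax? token "=" 1 with
    | some (key :: val :: _) => (acc.1, acc.2.1, acc.2.2.insert key val)
    | _ => acc
  else acc

def parse_attr_string (attr_string : String) : String × List String × (List (String × String)) :=
  let r := (PySem.Str.split₀ attr_string).foldl pvStepA ("", [], PySem.Dict.empty)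
  (r.1, r.2.1, r.2.2.items)

-- ===== PORT B =====
-- _scan(tokens): right-to-left structural recursion combining the head token with the
-- already-scanned suffix result (None sentinel ↦ Option)
def pvScan : List String → Option String × List String × List (String × String)
  | [] => (none, [], [])
  | t :: ts =>
    let r := pvScan ts
    if PySem.Str.startswith t "#" then
      (r.1.or (some (PySem.Str.slice t (some 1) none)), r.2.1, r.2.2)
    else if PySem.Str.startswith t "." then
      (r.1, PySem.Str.slice t (some 1) none :: r.2.1, r.2.2)
    else if PySem.Str.isIn "=" t then
      -- k, v = t.split('=', 1): '=' in t guarantees exactly two parts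
      match PySem.Str.splitMax? t "=" 1 with
      | some (k :: v :: _) => (r.1, r.2.1, (k, v) :: r.2.2)
      | _ => r
    else r

def parse_attr_string_alt (attr_string : String) : String × List String × (List (String × String)) :=
  let r := pvScan (PySem.Str.split₀ attr_string)
  (r.1.getD "", r.2.1, (PySem.Dict.ofList r.2.2).items)

-- ===== PRECONDITION & SPEC =====
def Spec_parse_attr_string (attr_string : String) (out : String × List String × (List (String × String))) : Prop := out = parse_attr_string_alt attr_string
instance (attr_string : String) (out : String × List String × (List (String × String))) : Decidable (Spec_parse_attr_string attr_string out) := by unfold Spec_parse_attr_string; infer_instance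

-- ===== CLAIM (what is proved, stated in full; the proofs are below) =====
def Claim_equal_parse_attr_string : Prop := ∀ (attr_string : String), Dom_parse_attr_string attr_string → Spec_parse_attr_string attr_string (parse_attr_string attr_string)

-- ===== LEMMAS AND PROOFS =====

-- A's left fold from any accumulator, expressed through B's right-to-left scan
lemma pv_foldlA_eq_scan (ts : List String) (id : String) (cls : List String)
    (d : PySem.Dict String String) :
    ts.foldl pvStepA (id, cls, d) =
      ((pvScan ts).1.getD id,
       cls ++ (pvScan ts).2.1,
       (pvScan ts).2.2.foldl (fun d p => d.insert p.1 p.2) d) := by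
  induction ts generalizing id cls d with
  | nil => simp [pvScan]
  | cons t ts ih =>
    by_cases h1 : PySem.Str.startswith t "#" = true
    · simp only [List.foldl_cons, pvStepA, h1, if_true, ih, pvScan]
      cases hx : (pvScan ts).1 <;> simp [Option.or]
    · by_cases h2 : PySem.Str.startswith t "." = true
      · simp only [List.foldl_cons, pvStepA, h1, h2, if_true, ih, pvScan]
        simp [List.append_assoc]
      · by_cases h3 : PySem.Str.isIn "=" t = true
        · simp only [List.foldl_cons, pvStepA, h1, h2, h3, if_true, pvScan]
          cases hs : PySem.Str.splitMax? t "=" 1 with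
          | none => simp only [ih]; simp
          | some parts =>
            match parts with
            | [] | [k] => simp only [ih]; simp
            | k :: v :: rest => simp only [ih]; simp
        · simp only [List.foldl_cons, pvStepA, h1, h2, h3, ih, pvScan]
          simp

-- ===== VERDICT (by name: the statement is the Claim_ definition above) =====
theorem parse_attr_string_spec : Claim_equal_parse_attr_string := by
  intro s _
  unfold Spec_parse_attr_string parse_attr_string parse_attr_string_alt
  rw [pv_foldlA_eq_scan]
  rfl
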